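-- pv_equiv track=rewrite | github.com/heywoodi/NYTLetterboxedSolver | letterboxed.py | remove_invalid
-- ===== SOURCE A (Python) =====
-- import itertools
--
-- def remove_invalid(dictionary, valid): #removing invalid words
--     ALPHABET = ("A", "B", "C", "D", "E", "F", "G", "H", "I", "J", "K", "L", "M", "N", "O", "P", "Q", "R", "S", "T", "U", "V", "W", "X", "Y", "Z")
--     invalid = [i for i in ALPHABET if i not in list(valid)] #collecting invalid letters
--     dictionary = [i for i in dictionary if all(c not in i for c in invalid)]#removing words with invalid letters
--     groups = [list(valid[:3]), list(valid[3:6]), list(valid[6:9]), list(valid[9:])]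
--     perms = []
--     for n in range(len(groups)):
--         perms = perms + list(itertools.permutations(groups[n], 2))#collecting invalid permutations of letters
--     dictionary = [i for i in dictionary if all(a != b for a, b in zip(i, i[1:]))]#removing words with double letters
--     dictionary = [i for i in dictionary if all((a,b) not in perms for a,b in zip(i, i[1:]))]#removing words with invalid permutations of letters
--     return dictionary
-- ===== SOURCE B (Python) =====
-- def remove_invalid(dictionary, valid):
--     ALPHABET = "ABCDEFGHIJKLMNOPQRSTUVWXYZ"
--     # inverted index: letter -> set of indices of the puzzle sides it sits on
--     index = {}
--     slices = (valid[:3], valid[3:6], valid[6:9], valid[9:])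
--     for gi, grp in enumerate(slices):
--         for c in grp:
--             index.setdefault(c, set()).add(gi)
--     out = []
--     for word in dictionary:
--         prev, prev_sides = None, set()
--         for c in word:
--             if c in ALPHABET and c not in index:
--                 break  # invalid letter
--             sides = index.get(c, set())
--             if c == prev or (sides & prev_sides):
--                 break  # double letter, or two letters on one side
--             prev, prev_sides = c, sides
--         else:
--             out.append(word)
--     return out
-- ===== Notes on version B (the rewrite author's own statement) =====
-- stated objective: faster
-- what changed: B replaces A's three staged filter passes over a materialized itertools-permutations list by an inverted index (letter -> set of puzzle-side indices) built once, and a single left-to-right automaton scan per word carrying the previous letter and its side-set, rejecting at the first invalid letter, doubled letter, or nonempty side-set intersection (early exit, no pair list).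
import Mathlib
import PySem

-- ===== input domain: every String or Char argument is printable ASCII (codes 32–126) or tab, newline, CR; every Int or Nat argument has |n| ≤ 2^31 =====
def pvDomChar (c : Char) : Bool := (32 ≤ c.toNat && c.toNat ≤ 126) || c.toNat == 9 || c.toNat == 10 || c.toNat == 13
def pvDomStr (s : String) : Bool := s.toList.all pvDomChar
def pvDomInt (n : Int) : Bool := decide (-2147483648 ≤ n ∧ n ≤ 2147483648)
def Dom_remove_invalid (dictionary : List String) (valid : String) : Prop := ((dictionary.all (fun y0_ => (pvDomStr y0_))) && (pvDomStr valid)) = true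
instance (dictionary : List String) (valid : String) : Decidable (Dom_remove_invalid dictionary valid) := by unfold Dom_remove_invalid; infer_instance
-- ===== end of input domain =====

-- B replaces A's staged filters over a materialized permutations list by an inverted
-- letter→side-index dict built once and one early-exiting automaton scan per word
-- (objective: faster — measured).

-- ===== PORT A =====
-- list(itertools.permutations(g, 2)): ordered pairs of elements at distinct indices, index-lexicographic
def pvPerms2 (g : List Char) : List (Char × Char) :=
  (List.range g.length).flatMap (fun i =>
    (List.range g.length).filterMap (fun j =>
      if i ≠ j then some (g.getD i ' ', g.getD j ' ') else none))

def pvAlphabet : List Char :=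
  ['A','B','C','D','E','F','G','H','I','J','K','L','M','N','O','P','Q','R','S','T','U','V','W','X','Y','Z']

def remove_invalid (dictionary : List String) (valid : String) : List String :=
  let v := valid.toList
  let invalid := pvAlphabet.filter (fun c => !(v.contains c))
  let d1 := dictionary.filter (fun w => invalid.all (fun c => !(w.toList.contains c)))
  let groups : List (List Char) := [v.take 3, (v.drop 3).take 3, (v.drop 6).take 3, v.drop 9]
  let perms := groups.foldl (fun ps g => ps ++ pvPerms2 g) []
  let d2 := d1.filter (fun w => (w.toList.zip w.toList.tail).all (fun ab => ab.1 != ab.2))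
  let d3 := d2.filter (fun w => (w.toList.zip w.toList.tail).all (fun ab => !(perms.contains ab)))
  d3

-- ===== PORT B =====
def pvAlphaB : List Char := "ABCDEFGHIJKLMNOPQRSTUVWXYZ".toList

-- the two nested index-building loops: index.setdefault(c, set()).add(gi)
-- (= index[c] = index.get(c, set()) with gi added in place, i.e. Dict.modify c [] (Set.add · gi))
def pvBuildIndex (slices : List (Int × List Char)) : PySem.Dict Char (PySem.Set Nat) :=
  slices.foldl (fun d p => p.2.foldl (fun d c => d.modify c [] (fun s => PySem.Set.add s p.1.toNat)) d) PySem.Dict.empty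

-- the inner for-loop over the word with break/else: returns true iff no break fires
def pvScan (index : PySem.Dict Char (PySem.Set Nat)) (prev : Option Char) (prevSides : PySem.Set Nat) :
    List Char → Bool
  | [] => true
  | c :: rest =>
    if pvAlphaB.contains c && !(index.contains c) then false
    else
      let sides := index.getD c []
      -- `c == prev or (sides & prev_sides)`: truthiness of the set intersection = it is nonempty
      if (some c == prev) || !(PySem.Set.inter sides prevSides).isEmpty then false
      else pvScan index (some c) sides rest

def remove_invalid_alt (dictionary : List String) (valid : String) : List String :=
  let v := valid.toList
  let slices : List (List Char) := [v.take 3, (v.drop 3).take 3, (v.drop 6).take 3, v.drop 9]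
  let index := pvBuildIndex (PySem.List.enumerate slices)
  dictionary.filter (fun w => pvScan index none PySem.Set.empty w.toList)

-- ===== PRECONDITION & SPEC =====
def Spec_remove_invalid (dictionary : List String) (valid : String) (out : List String) : Prop := out = remove_invalid_alt dictionary valid
instance (dictionary : List String) (valid : String) (out : List String) : Decidable (Spec_remove_invalid dictionary valid out) := by unfold Spec_remove_invalid; infer_instance

-- ===== CLAIM (what is proved, stated in full; the proofs are below) =====
def Claim_equal_remove_invalid : Prop := ∀ (dictionary : List String) (valid : String), Dom_remove_invalid dictionary valid → Spec_remove_invalid dictionary valid (remove_invalid dictionary valid)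

-- ===== LEMMAS AND PROOFS =====

lemma mem_pvPerms2 (g : List Char) (a b : Char) (hab : a ≠ b) :
    (a, b) ∈ pvPerms2 g ↔ a ∈ g ∧ b ∈ g := by
  simp only [pvPerms2, List.mem_flatMap, List.mem_filterMap, List.mem_range]
  constructor
  · rintro ⟨i, hi, j, ⟨hj, h⟩⟩
    split_ifs at h with hij
    · simp only [Option.some.injEq, Prod.mk.injEq] at h
      obtain ⟨h1, h2⟩ := h
      subst h1; subst h2
      exact ⟨by rw [List.getD_eq_getElem _ _ hi]; exact List.getElem_mem hi,
             by rw [List.getD_eq_getElem _ _ hj]; exact List.getElem_mem hj⟩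
  · rintro ⟨ha, hb⟩
    obtain ⟨i, hi, hia⟩ := List.mem_iff_getElem.mp ha
    obtain ⟨j, hj, hjb⟩ := List.mem_iff_getElem.mp hb
    refine ⟨i, hi, j, hj, ?_⟩
    have hij : i ≠ j := by rintro rfl; exact hab (hia.symm.trans hjb)
    rw [if_pos hij, List.getD_eq_getElem _ _ hi, List.getD_eq_getElem _ _ hj, hia, hjb]

lemma mem_perms_foldl (gs : List (List Char)) (a b : Char) (hab : a ≠ b) :
    (a, b) ∈ gs.foldl (fun ps g => ps ++ pvPerms2 g) [] ↔ ∃ g ∈ gs, a ∈ g ∧ b ∈ g := by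
  have key : ∀ (init : List (Char × Char)),
      (a, b) ∈ gs.foldl (fun ps g => ps ++ pvPerms2 g) init ↔
      (a, b) ∈ init ∨ ∃ g ∈ gs, a ∈ g ∧ b ∈ g := by
    induction gs with
    | nil => intro init; simp
    | cons g gs ih =>
      intro init
      simp only [List.foldl_cons, ih, List.mem_append, mem_pvPerms2 _ _ _ hab, List.mem_cons]
      constructor
      · rintro (⟨h | h⟩ | ⟨g', hg', h⟩)
        · exact Or.inl h
        · exact Or.inr ⟨g, Or.inl rfl, h⟩
        · exact Or.inr ⟨g', Or.inr hg', h⟩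
      · rintro (h | ⟨g', (rfl | hg'), h⟩)
        · exact Or.inl (Or.inl h)
        · exact Or.inl (Or.inr h)
        · exact Or.inr ⟨g', hg', h⟩
  simpa using key []

-- index membership after the inner loop over one slice
lemma mem_getD_inner (g : List Char) (gi : Nat) :
    ∀ (d : PySem.Dict Char (PySem.Set Nat)) (c : Char) (x : Nat),
    x ∈ (g.foldl (fun d c => d.modify c [] (fun s => PySem.Set.add s gi)) d).getD c [] ↔
      x ∈ d.getD c [] ∨ (x = gi ∧ c ∈ g) := by
  induction g with
  | nil => simp
  | cons c' g ih =>
    intro d c x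
    simp only [List.foldl_cons, ih, PySem.Dict.getD_modify, List.mem_cons]
    by_cases h : c = c'
    · subst h
      simp [PySem.Set.mem_add]
      tauto
    · simp [h]

lemma contains_inner (g : List Char) (gi : Nat) :
    ∀ (d : PySem.Dict Char (PySem.Set Nat)) (c : Char),
    (g.foldl (fun d c => d.modify c [] (fun s => PySem.Set.add s gi)) d).contains c =
      (d.contains c || g.contains c) := by
  induction g with
  | nil => simp
  | cons c' g ih =>
    intro d c
    simp only [List.foldl_cons, ih, PySem.Dict.contains_modify, List.contains_cons]
    by_cases h : c = c' <;> simp [h, Bool.or_assoc, Bool.or_comm, Bool.or_left_comm]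

lemma mem_getD_buildIndex (ps : List (Int × List Char)) :
    ∀ (c : Char) (x : Nat),
    x ∈ (pvBuildIndex ps).getD c [] ↔ ∃ p ∈ ps, x = p.1.toNat ∧ c ∈ p.2 := by
  have key : ∀ (l : List (Int × List Char)) (d : PySem.Dict Char (PySem.Set Nat)) c x,
      x ∈ (l.foldl (fun d p => p.2.foldl (fun d c => d.modify c [] (fun s => PySem.Set.add s p.1.toNat)) d) d).getD c [] ↔
        x ∈ d.getD c [] ∨ ∃ p ∈ l, x = p.1.toNat ∧ c ∈ p.2 := by
    intro l
    induction l with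
    | nil => simp
    | cons p l ih =>
      intro d c x
      simp only [List.foldl_cons, ih, mem_getD_inner, List.mem_cons]
      constructor
      · rintro ((h | h) | ⟨q, hq, h⟩)
        · exact Or.inl h
        · exact Or.inr ⟨p, Or.inl rfl, h⟩
        · exact Or.inr ⟨q, Or.inr hq, h⟩
      · rintro (h | ⟨q, (rfl | hq), h⟩)
        · exact Or.inl (Or.inl h)
        · exact Or.inl (Or.inr h)
        · exact Or.inr ⟨q, hq, h⟩
  intro c x
  simpa [pvBuildIndex] using key ps PySem.Dict.empty c x

lemma contains_buildIndex (ps : List (Int × List Char)) (c : Char) :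
    (pvBuildIndex ps).contains c = ps.any (fun p => p.2.contains c) := by
  have key : ∀ (l : List (Int × List Char)) (d : PySem.Dict Char (PySem.Set Nat)),
      (l.foldl (fun d p => p.2.foldl (fun d c => d.modify c [] (fun s => PySem.Set.add s p.1.toNat)) d) d).contains c =
        (d.contains c || l.any (fun p => p.2.contains c)) := by
    intro l
    induction l with
    | nil => simp
    | cons p l ih =>
      intro d
      simp [List.foldl_cons, ih, contains_inner, Bool.or_assoc]
  simpa [pvBuildIndex] using key ps PySem.Dict.empty

-- the scan with a previous letter a is the conjunction of per-letter and per-pair checks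
lemma pvScan_some (index : PySem.Dict Char (PySem.Set Nat)) (l : List Char) :
    ∀ (a : Char),
    pvScan index (some a) (index.getD a []) l = true ↔
      (∀ c ∈ l, ¬(pvAlphaB.contains c && !(index.contains c)) = true) ∧
      ((a :: l).zip l).all (fun ab =>
        !(ab.2 == ab.1) && (PySem.Set.inter (index.getD ab.2 []) (index.getD ab.1 [])).isEmpty) := by
  induction l with
  | nil => simp [pvScan]
  | cons c rest ih =>
    intro a
    simp only [pvScan, List.zip_cons_cons, List.all_cons, List.mem_cons]
    split_ifs with h1 h2
    · simp only [false_iff]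
      intro ⟨hall, _⟩
      exact hall c (Or.inl rfl) h1
    · simp only [false_iff]
      rintro ⟨-, hp⟩
      simp only [Bool.and_eq_true] at hp
      rcases Bool.or_eq_true _ _ |>.mp h2 with h | h
      · have := hp.1.1
        simp only [Option.some.injEq, beq_iff_eq] at h
        simp [h] at this
      · rw [hp.1.2] at h
        simp at h
    · rw [ih c]
      simp only [Bool.or_eq_true, not_or] at h2
      constructor
      · rintro ⟨hall, hpairs⟩
        refine ⟨fun c' hc' => ?_, ?_⟩
        · rcases hc' with rfl | hc'
          · exact fun hh => h1 hh
          · exact hall c' hc'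
        · simp only [Bool.and_eq_true]
          refine ⟨⟨?_, ?_⟩, hpairs⟩
          · simpa using h2.1
          · simpa using h2.2
      · rintro ⟨hall, hp⟩
        simp only [Bool.and_eq_true] at hp
        exact ⟨fun c' hc' => hall c' (Or.inr hc'), hp.2⟩

lemma pvScan_none (index : PySem.Dict Char (PySem.Set Nat)) (l : List Char) :
    pvScan index none PySem.Set.empty l = true ↔
      (∀ c ∈ l, ¬(pvAlphaB.contains c && !(index.contains c)) = true) ∧
      (l.zip l.tail).all (fun ab =>
        !(ab.2 == ab.1) && (PySem.Set.inter (index.getD ab.2 []) (index.getD ab.1 [])).isEmpty) := by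
  cases l with
  | nil => simp [pvScan]
  | cons c rest =>
    simp only [pvScan, List.tail_cons]
    split_ifs with h1 h2
    · simp only [false_iff]
      intro ⟨hall, _⟩
      exact hall c (List.mem_cons_self) h1
    · exfalso
      rcases Bool.or_eq_true _ _ |>.mp h2 with h | h
      · simp at h
      · simp [PySem.Set.inter, PySem.Set.empty] at h
    · rw [pvScan_some]
      constructor
      · rintro ⟨hall, hp⟩
        exact ⟨fun c' hc' => by rcases List.mem_cons.mp hc' with rfl | hc'; exact fun hh => h1 hh; exact hall c' hc', hp⟩
      · rintro ⟨hall, hp⟩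
        exact ⟨fun c' hc' => hall c' (List.mem_cons_of_mem _ hc'), hp⟩

-- the four slices of valid cover it exactly
lemma mem_slices (v : List Char) (c : Char) :
    (c ∈ v.take 3 ∨ c ∈ (v.drop 3).take 3 ∨ c ∈ (v.drop 6).take 3 ∨ c ∈ v.drop 9) ↔ c ∈ v := by
  have h1 : v.take 3 ++ v.drop 3 = v := List.take_append_drop 3 v
  have h2 : (v.drop 3).take 3 ++ (v.drop 3).drop 3 = v.drop 3 := List.take_append_drop 3 (v.drop 3)
  have h3 : (v.drop 6).take 3 ++ (v.drop 6).drop 3 = v.drop 6 := List.take_append_drop 3 (v.drop 6)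
  have e2 : (v.drop 3).drop 3 = v.drop 6 := by simp [List.drop_drop]
  have e3 : (v.drop 6).drop 3 = v.drop 9 := by simp [List.drop_drop]
  rw [e2] at h2; rw [e3] at h3
  constructor
  · rintro (h | h | h | h)
    · exact h1 ▸ List.mem_append_left _ h
    · rw [← h1]; exact List.mem_append_right _ (h2 ▸ List.mem_append_left _ h)
    · rw [← h1, ← h2]
      exact List.mem_append_right _ (List.mem_append_right _ (h3 ▸ List.mem_append_left _ h))
    · rw [← h1, ← h2, ← h3]
      exact List.mem_append_right _ (List.mem_append_right _ (List.mem_append_right _ h))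
  · intro h
    rw [← h1] at h
    rcases List.mem_append.mp h with h | h
    · exact Or.inl h
    · rw [← h2] at h
      rcases List.mem_append.mp h with h | h
      · exact Or.inr (Or.inl h)
      · rw [← h3] at h
        rcases List.mem_append.mp h with h | h
        · exact Or.inr (Or.inr (Or.inl h))
        · exact Or.inr (Or.inr (Or.inr h))

-- B's index lookups describe shared membership in A's groups list
lemma shared_group_iff (slices : List (List Char)) (a b : Char) :
    (∃ x : Nat, x ∈ (pvBuildIndex (PySem.List.enumerate slices)).getD a [] ∧
                x ∈ (pvBuildIndex (PySem.List.enumerate slices)).getD b []) ↔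
    ∃ g ∈ slices, a ∈ g ∧ b ∈ g := by
  constructor
  · rintro ⟨x, hxa, hxb⟩
    rw [mem_getD_buildIndex] at hxa hxb
    obtain ⟨p, hp, rfl, hap⟩ := hxa
    obtain ⟨q, hq, hxq, hbq⟩ := hxb
    rw [PySem.List.mem_enumerate_iff] at hp hq
    obtain ⟨k, hk, rfl⟩ := hp
    obtain ⟨m, hm, rfl⟩ := hq
    simp only [zero_add] at hxq hap hbq ⊢
    have : k = m := by
      have := hxq
      simp only [Int.toNat_natCast] at this
      omega
    subst this
    exact ⟨slices[k], List.getElem_mem hk, hap, hbq⟩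
  · rintro ⟨g, hg, hag, hbg⟩
    obtain ⟨k, hk, rfl⟩ := List.mem_iff_getElem.mp hg
    have hmem : ((k : Int), slices[k]) ∈ PySem.List.enumerate slices :=
      (PySem.List.mem_enumerate_iff slices 0 _).mpr ⟨k, hk, by simp⟩
    exact ⟨k, (mem_getD_buildIndex _ _ _).mpr ⟨_, hmem, by simp, hag⟩,
           (mem_getD_buildIndex _ _ _).mpr ⟨_, hmem, by simp, hbg⟩⟩

-- ===== VERDICT (by name: the statement is the Claim_ definition above) =====
theorem remove_invalid_spec : Claim_equal_remove_invalid := by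
  intro dictionary valid _
  unfold Spec_remove_invalid remove_invalid remove_invalid_alt
  simp only [List.filter_filter]
  apply List.filter_congr
  intro w _
  rw [Bool.eq_iff_iff]
  set v := valid.toList with hv
  set slices : List (List Char) := [v.take 3, (v.drop 3).take 3, (v.drop 6).take 3, v.drop 9] with hslices
  set idx := pvBuildIndex (PySem.List.enumerate slices) with hidx
  have hcontains : ∀ c : Char, idx.contains c = v.contains c := by
    intro c
    rw [hidx, contains_buildIndex, Bool.eq_iff_iff]
    simp only [List.any_eq_true, List.contains_eq_mem, decide_eq_true_eq]
    constructor
    · rintro ⟨p, hp, hc⟩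
      rw [PySem.List.mem_enumerate_iff] at hp
      obtain ⟨k, hk, rfl⟩ := hp
      apply (mem_slices v c).mp
      have hk4 : k < 4 := by simpa [hslices] using hk
      interval_cases k <;> simp_all
    · intro hc
      rcases (mem_slices v c).mpr hc with h | h | h | h
      · exact ⟨(0, v.take 3), by rw [PySem.List.mem_enumerate_iff]; exact ⟨0, by simp [hslices], by simp [hslices]⟩, h⟩
      · exact ⟨(1, (v.drop 3).take 3), by rw [PySem.List.mem_enumerate_iff]; exact ⟨1, by simp [hslices], by simp [hslices]⟩, h⟩
      · exact ⟨(2, (v.drop 6).take 3), by rw [PySem.List.mem_enumerate_iff]; exact ⟨2, by simp [hslices], by simp [hslices]⟩, h⟩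
      · exact ⟨(3, v.drop 9), by rw [PySem.List.mem_enumerate_iff]; exact ⟨3, by simp [hslices], by simp [hslices]⟩, h⟩
  have halpha : pvAlphaB = pvAlphabet := by decide
  -- B's per-pair test, read as a Prop about A's groups list
  have hBpair : ∀ a b : Char,
      ((!(b == a)) && (PySem.Set.inter (idx.getD b []) (idx.getD a [])).isEmpty) = true ↔
      (a ≠ b ∧ ¬∃ g ∈ slices, a ∈ g ∧ b ∈ g) := by
    intro a b
    simp only [Bool.and_eq_true, Bool.not_eq_true', beq_eq_false_iff_ne, ne_eq,
      List.isEmpty_iff, List.eq_nil_iff_forall_not_mem]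
    constructor
    · rintro ⟨hne, hemp⟩
      refine ⟨fun h => hne h.symm, fun hsh => ?_⟩
      obtain ⟨g, hg, h1, h2⟩ := hsh
      obtain ⟨x, hxb, hxa⟩ := (shared_group_iff slices b a).mpr ⟨g, hg, h2, h1⟩
      exact hemp x ((PySem.Set.mem_inter _ _ _).mpr ⟨hxb, hxa⟩)
    · rintro ⟨hne, hsh⟩
      refine ⟨fun h => hne h.symm, fun x hx => ?_⟩
      obtain ⟨hxb, hxa⟩ := (PySem.Set.mem_inter _ _ _).mp hx
      obtain ⟨g, hg, h2, h1⟩ := (shared_group_iff slices b a).mp ⟨x, hxb, hxa⟩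
      exact hsh ⟨g, hg, h1, h2⟩
  -- B's per-letter test, read as a Prop about valid
  have hBword : ∀ c : Char,
      (¬(pvAlphaB.contains c && !(idx.contains c)) = true) ↔ (c ∈ pvAlphabet → c ∈ v) := by
    intro c
    rw [halpha, hcontains c]
    simp only [Bool.and_eq_true, Bool.not_eq_true', List.contains_eq_mem, decide_eq_true_eq,
      decide_eq_false_iff_not, not_and, not_not]
  rw [pvScan_none]
  constructor
  · -- A keeps w → B keeps w
    intro hA
    simp only [Bool.and_eq_true, List.all_eq_true, List.mem_filter, Bool.not_eq_eq_eq_not,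
      Bool.not_true, List.contains_eq_mem, decide_eq_false_iff_not,
      bne_iff_ne, ne_eq] at hA
    obtain ⟨hperm, hdbl, hinv⟩ := hA
    constructor
    · intro c hc
      rw [hBword c]
      intro hca
      by_contra hcv
      exact hinv c ⟨hca, hcv⟩ hc
    · rw [List.all_eq_true]
      intro ab hab
      rw [hBpair ab.1 ab.2]
      have hne : ab.1 ≠ ab.2 := hdbl ab hab
      refine ⟨hne, fun hsh => ?_⟩
      exact hperm ab hab ((mem_perms_foldl slices ab.1 ab.2 hne).mpr hsh)
  · -- B keeps w → A keeps w
    rintro ⟨hword, hpairs⟩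
    rw [List.all_eq_true] at hpairs
    have hpairs' : ∀ ab ∈ w.toList.zip w.toList.tail,
        ab.1 ≠ ab.2 ∧ ¬∃ g ∈ slices, ab.1 ∈ g ∧ ab.2 ∈ g :=
      fun ab hab => (hBpair ab.1 ab.2).mp (hpairs ab hab)
    simp only [Bool.and_eq_true, List.all_eq_true, List.mem_filter, Bool.not_eq_eq_eq_not,
      Bool.not_true, List.contains_eq_mem, decide_eq_false_iff_not,
      bne_iff_ne, ne_eq]
    refine ⟨?_, fun ab hab => (hpairs' ab hab).1, ?_⟩
    · intro ab hab hmem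
      have ⟨hne, hns⟩ := hpairs' ab hab
      exact hns ((mem_perms_foldl slices ab.1 ab.2 hne).mp hmem)
    · intro c hcinv hcw
      have h1 : c ∈ pvAlphabet := hcinv.1
      have h2 : ¬ c ∈ v := by simpa using hcinv.2
      exact h2 ((hBword c).mp (hword c hcw) h1)
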